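-- pv_equiv track=rewrite | github.com/Skylake-dev/aoc | 2024/python/4.py | _diag_ltr_idxs
-- ===== SOURCE A (Python) =====
-- def _diag_ltr_idxs(lines: list[str], backwards=False) -> list[list[tuple[int, int]]]:
--     # helper to compute indexes of left to right diags
--     # nxn matrix means 2n-1 diagonals. for each diagonal the
--     # difference of indexes is constant (consider y-x because
--     # i found it easier to think about) e.g.
--     # [(3,0)] -> y-x=-3
--     # [(2,0),(3,1)] -> y-x=-2
--     result: list[list[tuple[int, int]]] = []
--     n: int = len(lines[0])
--     max_idx: int = n - 1
--     for diff in range(-max_idx, max_idx+1):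
--         # list all pairs with that diff
--         diag: list[tuple[int, int]] = []
--         # count is the number of elements in this diagonal
--         count = n - (abs(diff))
--         for i in reversed(range(count)):
--             x = min(max_idx-i-diff, max_idx-i)
--             y = x+diff  # since y-x=diff y is determined like this
--             diag.append((x, y))
--         if backwards:
--             result.append(list(reversed(diag)))
--         else:
--             result.append(diag)
--     return result
-- ===== SOURCE B (Python) =====
-- def _diag_ltr_idxs(lines: list[str], backwards=False) -> list[list[tuple[int, int]]]:
--     # single nested (x, y) pass scattering each cell into its diagonal bucket
--     n = len(lines[0])
--     max_idx = n - 1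
--     result: list[list[tuple[int, int]]] = [[] for _ in range(2 * n - 1)]
--     for x in range(n):
--         for y in range(n):
--             result[y - x + max_idx].append((x, y))
--     if backwards:
--         result = [list(reversed(d)) for d in result]
--     return result
-- ===== Notes on version B (the rewrite author's own statement) =====
-- stated objective: alternative
-- what changed: A generates each diagonal separately (outer loop over the index-difference, inner reversed loop computing x via min); B does one nested (x,y) pass over the grid, scattering every cell into its diagonal bucket y-x+max_idx, then reverses each bucket if backwards.
-- outside the precondition, e.g. on _diag_ltr_idxs([], False): A raises IndexError, B raises IndexError
import Mathlib
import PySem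

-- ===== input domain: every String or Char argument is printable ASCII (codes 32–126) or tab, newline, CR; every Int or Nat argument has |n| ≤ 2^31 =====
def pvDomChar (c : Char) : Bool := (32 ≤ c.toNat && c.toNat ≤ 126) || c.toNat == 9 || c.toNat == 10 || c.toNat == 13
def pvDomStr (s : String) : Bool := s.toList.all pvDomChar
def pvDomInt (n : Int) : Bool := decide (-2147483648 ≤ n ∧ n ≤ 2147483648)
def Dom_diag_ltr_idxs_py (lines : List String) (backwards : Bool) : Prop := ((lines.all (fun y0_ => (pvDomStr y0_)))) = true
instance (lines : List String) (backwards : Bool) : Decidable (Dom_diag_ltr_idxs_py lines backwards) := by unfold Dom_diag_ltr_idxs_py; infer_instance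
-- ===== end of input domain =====

-- B replaces A's per-diagonal generation by a single nested (x,y) pass scattering each cell
-- into its diagonal bucket y-x+max_idx (alternative decomposition, same asymptotic cost).

-- ===== PORT A =====
def diag_ltr_idxs_py (lines : List String) (backwards : Bool) : List (List (Int × Int)) :=
  let n : Int := PySem.Str.len ((PySem.List.pyGet? lines 0).getD "")
  let maxIdx : Int := n - 1
  (PySem.List.pyRange (-maxIdx) (maxIdx + 1)).foldl (fun result diff =>
    let count : Int := n - |diff|
    let diag : List (Int × Int) :=
      ((PySem.List.pyRange 0 count).reverse).foldl (fun diag i =>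
        let x : Int := min (maxIdx - i - diff) (maxIdx - i)
        let y : Int := x + diff
        diag ++ [(x, y)]) []
    result ++ [if backwards then diag.reverse else diag]) []

-- ===== PORT B =====
-- the list index y - x + maxIdx is nonnegative in every executed iteration, so .toNat is exact
def diag_ltr_idxs_py_alt (lines : List String) (backwards : Bool) : List (List (Int × Int)) :=
  let n : Int := PySem.Str.len ((PySem.List.pyGet? lines 0).getD "")
  let maxIdx : Int := n - 1
  let result0 : List (List (Int × Int)) := (PySem.List.pyRange 0 (2 * n - 1)).map (fun _ => [])
  let result : List (List (Int × Int)) :=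
    (PySem.List.pyRange 0 n).foldl (fun r x =>
      (PySem.List.pyRange 0 n).foldl (fun r y =>
        r.modify (y - x + maxIdx).toNat (fun diag => diag ++ [(x, y)])) r) result0
  if backwards then result.map (fun d => d.reverse) else result

-- ===== PRECONDITION & SPEC =====
-- Pre_ excludes lines = [], on which both Pythons raise IndexError at lines[0]
def Pre_diag_ltr_idxs_py (lines : List String) (backwards : Bool) : Prop := lines ≠ []
instance (lines : List String) (backwards : Bool) : Decidable (Pre_diag_ltr_idxs_py lines backwards) := by unfold Pre_diag_ltr_idxs_py; infer_instance
def pvWitness_diag_ltr_idxs_py : List String × Bool := (["abc", "def", "ghi"], false)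
def Spec_diag_ltr_idxs_py (lines : List String) (backwards : Bool) (out : List (List (Int × Int))) : Prop := out = diag_ltr_idxs_py_alt lines backwards
instance (lines : List String) (backwards : Bool) (out : List (List (Int × Int))) : Decidable (Spec_diag_ltr_idxs_py lines backwards out) := by unfold Spec_diag_ltr_idxs_py; infer_instance

-- ===== CLAIM (what is proved, stated in full; the proofs are below) =====
def Claim_equal_diag_ltr_idxs_py : Prop := ∀ (lines : List String) (backwards : Bool), Dom_diag_ltr_idxs_py lines backwards → Pre_diag_ltr_idxs_py lines backwards → Spec_diag_ltr_idxs_py lines backwards (diag_ltr_idxs_py lines backwards)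

-- ===== LEMMAS AND PROOFS =====

-- canonical content of the diagonal with index difference `diff` in an N×N grid, ascending x
def pvBucket (N : Nat) (diff : Int) : List (Int × Int) :=
  (List.range (N - diff.natAbs)).map (fun (j : Nat) => ((max (-diff) 0 + (j : Int)), max (-diff) 0 + (j : Int) + diff))

lemma pvPyRange_nil (a b : Int) (h : b ≤ a) : PySem.List.pyRange a b = [] := by
  refine List.eq_nil_iff_forall_not_mem.mpr (fun x hx => ?_)
  have := PySem.List.mem_pyRange_one.mp hx
  omega

lemma pvPyRange_eq_map (a b : Int) :
    PySem.List.pyRange a b = (List.range (b - a).toNat).map (fun (i : Nat) => a + (i : Int)) := by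
  generalize hk : (b - a).toNat = k
  induction k generalizing a with
  | zero =>
    simp [pvPyRange_nil a b (by omega)]
  | succ k ih =>
    rw [PySem.List.pyRange_one_cons (by omega)]
    rw [ih (a + 1) (by omega)]
    rw [List.range_succ_eq_map]
    simp only [List.map_cons, List.map_map]
    congr 1
    · omega
    · exact List.map_congr_left (fun i _ => by simp only [Function.comp_apply]; omega)

lemma pvFilterMap_pyRange_single {α : Type} (K : Nat) (t : Int) (f : Int → α) :
    (PySem.List.pyRange 0 (K : Int)).filterMap (fun y => if y = t then some (f y) else none)
      = if 0 ≤ t ∧ t < (K : Int) then [f t] else [] := by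
  induction K with
  | zero =>
    rw [pvPyRange_nil 0 ((0 : Nat) : Int) (by omega), if_neg (by omega)]
    simp
  | succ K ih =>
    rw [(by push_cast; ring : ((K + 1 : Nat) : Int) = (K : Int) + 1),
      PySem.List.pyRange_one_succ_right (by omega), List.filterMap_append, ih]
    simp only [List.filterMap_cons, List.filterMap_nil]
    by_cases h : (K : Int) = t
    · rw [if_pos h, if_neg (by omega), if_pos (by omega)]
      simp [h]
    · rw [if_neg h]
      by_cases h2 : 0 ≤ t ∧ t < (K : Int)
      · rw [if_pos h2, if_pos (by omega)]; simp
      · rw [if_neg h2, if_neg (by omega)]; simp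

lemma pvFilterMap_pyRange_interval {α : Type} (K : Nat) (a b : Int) (f : Int → α) :
    (PySem.List.pyRange 0 (K : Int)).filterMap (fun y => if a ≤ y ∧ y < b then some (f y) else none)
      = (List.range (min (K : Int) b - max a 0).toNat).map (fun (t : Nat) => f (max a 0 + (t : Int))) := by
  induction K with
  | zero =>
    rw [pvPyRange_nil 0 ((0 : Nat) : Int) (by omega),
      (by push_cast; omega : (min ((0 : Nat) : Int) b - max a 0).toNat = 0)]
    simp
  | succ K ih =>
    rw [(by push_cast; ring : ((K + 1 : Nat) : Int) = (K : Int) + 1),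
      PySem.List.pyRange_one_succ_right (by omega), List.filterMap_append, ih]
    simp only [List.filterMap_cons, List.filterMap_nil]
    by_cases h : a ≤ (K : Int) ∧ (K : Int) < b
    · rw [if_pos h,
        (by omega : (min ((K : Int) + 1) b - max a 0).toNat = (min (K : Int) b - max a 0).toNat + 1),
        List.range_succ, List.map_append]
      simp only [List.map_cons, List.map_nil]
      have harg : max a 0 + (((min (K : Int) b - max a 0).toNat : Nat) : Int) = (K : Int) := by omega
      rw [harg]
    · rw [if_neg h,
        (by omega : (min ((K : Int) + 1) b - max a 0).toNat = (min (K : Int) b - max a 0).toNat)]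
      simp

lemma pvFlatMap_if_singleton {α β : Type} (l : List α) (p : α → Prop) [DecidablePred p] (f : α → β) :
    (l.flatMap (fun x => if p x then [f x] else []))
      = l.filterMap (fun x => if p x then some (f x) else none) := by
  induction l with
  | nil => simp
  | cons x l ih =>
    simp only [List.flatMap_cons, List.filterMap_cons, ih]
    by_cases h : p x <;> simp [h]

lemma pvInnerFold_getElem? (ys : List Int) (r : List (List (Int × Int))) (x m : Int) (d : Nat) :
    (ys.foldl (fun r y => r.modify (y - x + m).toNat (fun diag => diag ++ [(x, y)])) r)[d]?
      = (r[d]?).map (fun diag =>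
          diag ++ ys.filterMap (fun y => if (y - x + m).toNat = d then some (x, y) else none)) := by
  induction ys generalizing r with
  | nil => cases h : r[d]? <;> simp [h]
  | cons y ys ih =>
    rw [List.foldl_cons, ih, List.getElem?_modify]
    simp only [List.filterMap_cons]
    by_cases h : (y - x + m).toNat = d
    · rw [if_pos h]
      cases hr : r[d]? <;> simp [h, hr]
    · rw [if_neg h]
      cases hr : r[d]? <;> simp [h]

lemma pvOuterFold_getElem? (c m : Int) (xs : List Int) (r : List (List (Int × Int))) (d : Nat) :
    (xs.foldl (fun r x =>
        (PySem.List.pyRange 0 c).foldl (fun r y =>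
          r.modify (y - x + m).toNat (fun diag => diag ++ [(x, y)])) r) r)[d]?
      = (r[d]?).map (fun diag =>
          diag ++ xs.flatMap (fun x =>
            (PySem.List.pyRange 0 c).filterMap (fun y => if (y - x + m).toNat = d then some (x, y) else none))) := by
  induction xs generalizing r with
  | nil => cases h : r[d]? <;> simp [h]
  | cons x xs ih =>
    rw [List.foldl_cons, ih, pvInnerFold_getElem?]
    cases hr : r[d]? <;> simp

lemma pvContrib_eq (N : Nat) (d : Nat) (hd : d < 2 * N - 1) :
    (PySem.List.pyRange 0 (N : Int)).flatMap (fun x =>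
        (PySem.List.pyRange 0 (N : Int)).filterMap (fun y =>
          if (y - x + ((N : Int) - 1)).toNat = d then some (x, y) else none))
      = pvBucket N ((d : Int) - ((N : Int) - 1)) := by
  have hstep : ∀ x ∈ PySem.List.pyRange 0 (N : Int),
      (PySem.List.pyRange 0 (N : Int)).filterMap (fun y =>
          if (y - x + ((N : Int) - 1)).toNat = d then some (x, y) else none)
        = if 0 ≤ x + ((d : Int) - ((N : Int) - 1)) ∧ x + ((d : Int) - ((N : Int) - 1)) < (N : Int)
            then [(x, x + ((d : Int) - ((N : Int) - 1)))] else [] := by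
    intro x hx
    have hxb := PySem.List.mem_pyRange_one.mp hx
    have hcg : ∀ y ∈ PySem.List.pyRange 0 (N : Int),
        (if (y - x + ((N : Int) - 1)).toNat = d then some ((x, y) : Int × Int) else none)
          = (if y = (d : Int) + x - ((N : Int) - 1) then some ((x, y) : Int × Int) else none) := by
      intro y hy
      have hyb := PySem.List.mem_pyRange_one.mp hy
      by_cases h : y = (d : Int) + x - ((N : Int) - 1)
      · rw [if_pos (by omega), if_pos h]
      · rw [if_neg (by omega), if_neg h]
    rw [List.filterMap_congr hcg,
      pvFilterMap_pyRange_single N ((d : Int) + x - ((N : Int) - 1)) (fun y : Int => ((x, y) : Int × Int))]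
    by_cases h : 0 ≤ x + ((d : Int) - ((N : Int) - 1)) ∧ x + ((d : Int) - ((N : Int) - 1)) < (N : Int)
    · rw [if_pos (by omega), if_pos h]
      rw [(by ring : (d : Int) + x - ((N : Int) - 1) = x + ((d : Int) - ((N : Int) - 1)))]
    · rw [if_neg (by omega), if_neg h]
  rw [List.flatMap_congr hstep, pvFlatMap_if_singleton]
  have hcg2 : ∀ x ∈ PySem.List.pyRange 0 (N : Int),
      (if 0 ≤ x + ((d : Int) - ((N : Int) - 1)) ∧ x + ((d : Int) - ((N : Int) - 1)) < (N : Int)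
          then some ((x, x + ((d : Int) - ((N : Int) - 1))) : Int × Int) else none)
        = (if (-((d : Int) - ((N : Int) - 1))) ≤ x ∧ x < (N : Int) - ((d : Int) - ((N : Int) - 1))
          then some ((x, x + ((d : Int) - ((N : Int) - 1))) : Int × Int) else none) := by
    intro x _
    by_cases h : 0 ≤ x + ((d : Int) - ((N : Int) - 1)) ∧ x + ((d : Int) - ((N : Int) - 1)) < (N : Int)
    · rw [if_pos h, if_pos (by omega)]
    · rw [if_neg h, if_neg (by omega)]
  rw [List.filterMap_congr hcg2,
    pvFilterMap_pyRange_interval N (-((d : Int) - ((N : Int) - 1))) ((N : Int) - ((d : Int) - ((N : Int) - 1)))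
      (fun x : Int => ((x, x + ((d : Int) - ((N : Int) - 1))) : Int × Int))]
  unfold pvBucket
  have harg : (min ((N : Nat) : Int) ((N : Int) - ((d : Int) - ((N : Int) - 1))) - max (-((d : Int) - ((N : Int) - 1))) 0).toNat
      = N - ((d : Int) - ((N : Int) - 1)).natAbs := by omega
  rw [harg]

-- A's inner loop builds exactly the canonical diagonal
lemma pvDiagA (N : Nat) (diff : Int) (h1 : -((N : Int) - 1) ≤ diff) (h2 : diff < (N : Int)) :
    ((PySem.List.pyRange 0 ((N : Int) - |diff|)).reverse).foldl (fun diag i =>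
        diag ++ [(min (((N : Int) - 1) - i - diff) (((N : Int) - 1) - i),
                  min (((N : Int) - 1) - i - diff) (((N : Int) - 1) - i) + diff)]) []
      = pvBucket N diff := by
  rw [PySem.List.foldl_append_singleton_eq_map (fun i : Int =>
    ((min (((N : Int) - 1) - i - diff) (((N : Int) - 1) - i),
      min (((N : Int) - 1) - i - diff) (((N : Int) - 1) - i) + diff) : Int × Int))]
  rw [List.nil_append]
  have hc : (N : Int) - |diff| = ((N - diff.natAbs : Nat) : Int) := by
    rw [Int.abs_eq_natAbs]; omega
  rw [hc, PySem.List.pyRange_zero_natCast]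
  unfold pvBucket
  apply List.ext_getElem
  · simp
  · intro j hj hj2
    simp only [List.length_map, List.length_reverse, List.length_range] at hj
    simp only [List.getElem_map, List.getElem_reverse, List.length_map, List.length_range,
      List.getElem_range]
    simp only [Prod.mk.injEq]
    constructor
    · omega
    · omega

-- the characterizations of the two ports
lemma pvPortA_char (s : String) (rest : List String) (backwards : Bool) :
    diag_ltr_idxs_py (s :: rest) backwards
      = (List.range (2 * s.toList.length - 1)).map (fun (d : Nat) =>
          if backwards then (pvBucket s.toList.length ((d : Int) - ((s.toList.length : Int) - 1))).reverse
          else pvBucket s.toList.length ((d : Int) - ((s.toList.length : Int) - 1))) := by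
  have hget : (PySem.List.pyGet? (s :: rest) 0).getD "" = s := by
    simp [PySem.List.pyGet?, PySem.List.pyIdx?]
  simp only [diag_ltr_idxs_py, hget, PySem.Str.len_eq]
  generalize s.toList.length = N
  rw [PySem.List.foldl_append_singleton_eq_map, List.nil_append,
    pvPyRange_eq_map (-((N : Int) - 1)) (((N : Int) - 1) + 1),
    (by omega : ((((N : Int) - 1) + 1) - (-((N : Int) - 1))).toNat = 2 * N - 1),
    List.map_map]
  apply List.map_congr_left
  intro d hd
  have hdlt := List.mem_range.mp hd
  simp only [Function.comp_apply]
  rw [(by ring : -((N : Int) - 1) + (d : Int) = (d : Int) - ((N : Int) - 1))]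
  rw [pvDiagA N ((d : Int) - ((N : Int) - 1)) (by omega) (by omega)]

lemma pvPortB_char (s : String) (rest : List String) (backwards : Bool) :
    diag_ltr_idxs_py_alt (s :: rest) backwards
      = (List.range (2 * s.toList.length - 1)).map (fun (d : Nat) =>
          if backwards then (pvBucket s.toList.length ((d : Int) - ((s.toList.length : Int) - 1))).reverse
          else pvBucket s.toList.length ((d : Int) - ((s.toList.length : Int) - 1))) := by
  have hget : (PySem.List.pyGet? (s :: rest) 0).getD "" = s := by
    simp [PySem.List.pyGet?, PySem.List.pyIdx?]
  simp only [diag_ltr_idxs_py_alt, hget, PySem.Str.len_eq]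
  generalize s.toList.length = N
  have hR : ((PySem.List.pyRange 0 (N : Int)).foldl (fun r x =>
        (PySem.List.pyRange 0 (N : Int)).foldl (fun r y =>
          r.modify (y - x + ((N : Int) - 1)).toNat (fun diag => diag ++ [(x, y)])) r)
        ((PySem.List.pyRange 0 (2 * (N : Int) - 1)).map (fun _ => ([] : List (Int × Int)))))
      = (List.range (2 * N - 1)).map (fun (d : Nat) => pvBucket N ((d : Int) - ((N : Int) - 1))) := by
    apply List.ext_getElem?
    intro i
    rw [pvOuterFold_getElem? (N : Int) ((N : Int) - 1),
      pvPyRange_eq_map 0 (2 * (N : Int) - 1),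
      (by omega : ((2 * (N : Int) - 1) - 0).toNat = 2 * N - 1)]
    by_cases hi : i < 2 * N - 1
    · rw [List.getElem?_map, List.getElem?_map, List.getElem?_map,
        List.getElem?_range hi]
      simp only [Option.map_some, List.nil_append]
      rw [pvContrib_eq N i hi]
    · have h1 : (List.range (2 * N - 1))[i]? = none :=
        List.getElem?_eq_none (by simp only [List.length_range]; omega)
      rw [List.getElem?_map, List.getElem?_map, List.getElem?_map, h1]
      simp
  rw [hR]
  cases backwards with
  | false => simp
  | true => simp [List.map_map, Function.comp]

-- ===== VERDICT (by name: the statement is the Claim_ definition above) =====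
theorem diag_ltr_idxs_py_spec : Claim_equal_diag_ltr_idxs_py := by
  intro lines backwards _ hpre
  unfold Spec_diag_ltr_idxs_py
  obtain ⟨s, rest, rfl⟩ : ∃ s rest, lines = s :: rest := by
    cases lines with
    | nil => exact absurd rfl hpre
    | cons s rest => exact ⟨s, rest, rfl⟩
  rw [pvPortA_char, pvPortB_char]
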